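-- pv_equiv track=rewrite | github.com/benmsanderson/METEOR | scripts/make_noresm_test.py | make_labels_and_suptitles
-- ===== SOURCE A (Python) =====
-- def make_labels_and_suptitles(exp_lists):
--     suptitles = ["Global mean change"]
--     labels = []
--     for def_exp in exp_lists:
--         label = ""
--         strn = "Pattern with "
--         for i, sub_e in enumerate(def_exp):
--             if i == 0:
--                 continue
--             compound = sub_e.split("x")[0]
--             if i == 1:
--                 label = f"{label}{compound.upper()}"
--                 strn = f"{strn}{compound}"
--             elif i < len(def_exp)-1:
--                 label = f"{label}+{compound.upper()}"
--                 strn = f"{strn}, {compound}"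
--             else:
--                 label = f"{label}+{compound.upper()}"
--                 strn = f"{strn} and {compound}"
--         labels.append(label)
--         suptitles.append(strn)
--     suptitles.append("CMIP5 1850-1900 vs 2081-2100")
--     return suptitles, labels
-- ===== SOURCE B (Python) =====
-- def _gram(compounds):
--     if len(compounds) <= 1:
--         return "".join(compounds)
--     if len(compounds) == 2:
--         return compounds[0] + " and " + compounds[1]
--     return compounds[0] + ", " + _gram(compounds[1:])
--
--
-- def make_labels_and_suptitles(exp_lists):
--     comps = [[s.split("x")[0] for s in d[1:]] for d in exp_lists]
--     labels = ["+".join(c.upper() for c in cs) for cs in comps]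
--     suptitles = (["Global mean change"]
--                  + ["Pattern with " + _gram(cs) for cs in comps]
--                  + ["CMIP5 1850-1900 vs 2081-2100"])
--     return suptitles, labels
-- ===== Notes on version B (the rewrite author's own statement) =====
-- stated objective: simpler
-- what changed: A builds each label/suptitle in one index-driven enumerate loop with first/middle/last branches keyed on the index; B first extracts the compound list per experiment, then derives the label with a plain '+'.join and the suptitle with a small recursive grammatical-join helper (empty/one/two/many cases), assembling both result lists by comprehension.
import Mathlib
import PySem

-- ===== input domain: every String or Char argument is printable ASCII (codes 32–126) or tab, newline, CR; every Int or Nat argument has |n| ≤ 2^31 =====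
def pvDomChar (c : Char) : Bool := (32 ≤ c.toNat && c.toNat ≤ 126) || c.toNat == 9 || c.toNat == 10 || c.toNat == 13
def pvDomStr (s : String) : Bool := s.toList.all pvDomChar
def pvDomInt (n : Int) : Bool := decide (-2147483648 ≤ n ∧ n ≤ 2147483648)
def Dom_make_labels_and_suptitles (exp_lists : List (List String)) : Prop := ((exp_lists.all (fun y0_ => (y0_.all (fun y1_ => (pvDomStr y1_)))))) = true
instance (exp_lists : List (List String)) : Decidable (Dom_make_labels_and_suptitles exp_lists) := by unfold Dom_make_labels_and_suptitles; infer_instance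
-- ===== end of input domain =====

-- B replaces A's index-driven first/middle/last loop with a per-experiment compound list,
-- a '+'-join for the label and a recursive grammatical join for the suptitle (simpler decomposition).

-- shared expression of both sources: s.split("x")[0]  (split? is some: "x" ≠ "", and its result is never empty)
def mlsComp (s : String) : String := (((PySem.Str.split? s "x").getD []).headD "")

-- ===== PORT A =====
-- the body of A's inner 'for i, sub_e in enumerate(def_exp)' loop (n = len(def_exp))
def mlsStepA (n : Int) (st : String × String) (p : Int × String) : String × String :=
  if p.1 == 0 then st
  else
    let compound := mlsComp p.2
    if p.1 == 1 then (st.1 ++ PySem.Str.upper compound, st.2 ++ compound)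
    else if p.1 < n - 1 then (st.1 ++ "+" ++ PySem.Str.upper compound, st.2 ++ ", " ++ compound)
    else (st.1 ++ "+" ++ PySem.Str.upper compound, st.2 ++ " and " ++ compound)

def make_labels_and_suptitles (exp_lists : List (List String)) : List String × List String :=
  let acc := exp_lists.foldl (fun (acc : List String × List String) def_exp =>
    let st := (PySem.List.enumerate def_exp 0).foldl (mlsStepA (def_exp.length : Int))
      ("", "Pattern with ")
    (acc.1 ++ [st.2], acc.2 ++ [st.1]))
    (["Global mean change"], ([] : List String))
  (acc.1 ++ ["CMIP5 1850-1900 vs 2081-2100"], acc.2)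

-- ===== PORT B =====
-- _gram from Source B: grammatical join of a compound list ('', 'a', 'a and b', 'a, b and c', …)
def mlsGram : List String → String
  | [] => ""
  | [c] => c
  | c :: d :: rest =>
    if rest = [] then c ++ " and " ++ d
    else c ++ ", " ++ mlsGram (d :: rest)

def make_labels_and_suptitles_alt (exp_lists : List (List String)) : List String × List String :=
  let comps := exp_lists.map (fun d => (PySem.List.slice d (some 1) none).map mlsComp)
  let labels := comps.map (fun cs => PySem.Str.join "+" (cs.map PySem.Str.upper))
  (["Global mean change"] ++ comps.map (fun cs => "Pattern with " ++ mlsGram cs)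
     ++ ["CMIP5 1850-1900 vs 2081-2100"], labels)

-- ===== PRECONDITION & SPEC =====
def Spec_make_labels_and_suptitles (exp_lists : List (List String)) (out : List String × List String) : Prop := out = make_labels_and_suptitles_alt exp_lists
instance (exp_lists : List (List String)) (out : List String × List String) : Decidable (Spec_make_labels_and_suptitles exp_lists out) := by unfold Spec_make_labels_and_suptitles; infer_instance

-- ===== CLAIM (what is proved, stated in full; the proofs are below) =====
def Claim_equal_make_labels_and_suptitles : Prop := ∀ (exp_lists : List (List String)), Dom_make_labels_and_suptitles exp_lists → Spec_make_labels_and_suptitles exp_lists (make_labels_and_suptitles exp_lists)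

-- ===== LEMMAS AND PROOFS =====
-- proof-side shapes of the tail of A's inner loop (inputs already comp'd / upper'd)
def mlsLabT : List String → String
  | [] => ""
  | c :: rest => "+" ++ c ++ mlsLabT rest

def mlsGramT : List String → String
  | [] => ""
  | [c] => " and " ++ c
  | c :: d :: rest => ", " ++ c ++ mlsGramT (d :: rest)

theorem mlsGram_cons (c : String) (cs : List String) (h : cs ≠ []) :
    mlsGram (c :: cs) = c ++ mlsGramT cs := by
  induction cs generalizing c with
  | nil => exact absurd rfl h
  | cons d rest ih =>
    cases rest with
    | nil => simp [mlsGram, mlsGramT, String.append_assoc]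
    | cons e rs =>
      rw [mlsGram, if_neg (by simp)]
      rw [ih d (by simp)]
      simp [mlsGramT, String.append_assoc]

theorem mlsJoin_cons (u : String) (us : List String) :
    PySem.Str.join "+" (u :: us) = u ++ mlsLabT us := by
  induction us generalizing u with
  | nil =>
    apply String.toList_inj.mp
    simp [PySem.Str.toList_join, PySem.Chars.join_singleton, mlsLabT]
  | cons v vs ih =>
    apply String.toList_inj.mp
    have h := congrArg String.toList (ih v)
    simp only [PySem.Str.toList_join, List.map] at h ⊢
    rw [PySem.Chars.join_cons_cons, h]
    simp [mlsLabT]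

theorem mlsMid (n : Int) (rest : List String) : ∀ (k : Int) (lab strn : String),
    rest ≠ [] → k = n - rest.length → 2 ≤ k →
    (PySem.List.enumerate rest k).foldl (mlsStepA n) (lab, strn)
      = (lab ++ mlsLabT ((rest.map mlsComp).map PySem.Str.upper),
         strn ++ mlsGramT (rest.map mlsComp)) := by
  induction rest with
  | nil => intro k lab strn h; exact absurd rfl h
  | cons r rs ih =>
    intro k lab strn _ hk h2
    have h0 : (k == 0) = false := by simp; omega
    have h1 : (k == 1) = false := by simp; omega
    rw [PySem.List.enumerate_cons, List.foldl_cons]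
    cases rs with
    | nil =>
      have hlt : ¬ (k < n - 1) := by simp at hk; omega
      simp [mlsStepA, h0, h1, hlt, mlsLabT, mlsGramT, String.append_assoc,
        String.append_empty]
    | cons s ss =>
      have hnn : (0:Int) ≤ (ss.length : Int) := Int.natCast_nonneg _
      have hk' : k = n - ((ss.length : Int) + 2) := by
        rw [hk]; simp; ring
      have hlt : (k < n - 1) := by omega
      rw [show mlsStepA n (lab, strn) (k, r)
            = (lab ++ "+" ++ PySem.Str.upper (mlsComp r), strn ++ ", " ++ mlsComp r) by
          simp [mlsStepA, h0, h1, hlt]]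
      rw [ih (k + 1) _ _ (by simp) (by simp; omega) (by omega)]
      simp [mlsLabT, mlsGramT, String.append_assoc]

theorem mlsInner (d : List String) :
    (PySem.List.enumerate d 0).foldl (mlsStepA (d.length : Int)) ("", "Pattern with ")
      = (PySem.Str.join "+" (((d.drop 1).map mlsComp).map PySem.Str.upper),
         "Pattern with " ++ mlsGram ((d.drop 1).map mlsComp)) := by
  have hjoin_nil : PySem.Str.join "+" ([] : List String) = "" := by
    apply String.toList_inj.mp
    simp [PySem.Str.toList_join, PySem.Chars.join_nil]
  rcases d with _ | ⟨a, _ | ⟨b, rest⟩⟩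
  · simp [PySem.List.enumerate_nil, mlsGram, hjoin_nil, String.append_empty]
  · simp [PySem.List.enumerate_cons, PySem.List.enumerate_nil, mlsStepA, mlsGram,
      hjoin_nil, String.append_empty]
  · rw [PySem.List.enumerate_cons, PySem.List.enumerate_cons, List.foldl_cons, List.foldl_cons]
    rw [show mlsStepA ((a :: b :: rest).length : Nat) ("", "Pattern with ") ((0 : Int), a)
          = ("", "Pattern with ") by simp [mlsStepA]]
    rw [show mlsStepA ((a :: b :: rest).length : Nat) ("", "Pattern with ") ((0 : Int) + 1, b)
          = ("" ++ PySem.Str.upper (mlsComp b), "Pattern with " ++ mlsComp b) by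
        simp [mlsStepA]]
    cases rest with
    | nil =>
      apply Prod.ext
      · apply String.toList_inj.mp
        simp [PySem.List.enumerate_nil, PySem.Str.toList_join, PySem.Chars.join_singleton]
      · simp [PySem.List.enumerate_nil, mlsGram]
    | cons r rs =>
      rw [mlsMid ((a :: b :: r :: rs).length : Nat) (r :: rs) ((0 : Int) + 1 + 1) _ _ (by simp)
        (by simp; ring) (by omega)]
      simp only [List.drop_succ_cons, List.drop_zero, List.map_cons]
      rw [mlsJoin_cons, mlsGram_cons _ _ (by simp)]
      simp [String.append_assoc]

theorem mlsOuter (l : List (List String)) : ∀ (S L : List String),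
    l.foldl (fun (acc : List String × List String) def_exp =>
      let st := (PySem.List.enumerate def_exp 0).foldl (mlsStepA (def_exp.length : Int))
        ("", "Pattern with ")
      (acc.1 ++ [st.2], acc.2 ++ [st.1])) (S, L)
    = (S ++ l.map (fun d => "Pattern with " ++ mlsGram ((d.drop 1).map mlsComp)),
       L ++ l.map (fun d => PySem.Str.join "+" (((d.drop 1).map mlsComp).map PySem.Str.upper))) := by
  induction l with
  | nil => simp
  | cons d ds ih =>
    intro S L
    rw [List.foldl_cons]
    simp only [mlsInner d]
    rw [ih]
    simp

-- ===== VERDICT (by name: the statement is the Claim_ definition above) =====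
theorem make_labels_and_suptitles_spec : Claim_equal_make_labels_and_suptitles := by
  intro el _
  show _ = _
  rw [make_labels_and_suptitles, make_labels_and_suptitles_alt]
  simp only [mlsOuter, PySem.List.slice_from_one, ← List.drop_one, List.map_map]
  simp [Function.comp]
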